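-- pv_equiv track=rewrite | github.com/MeshanKhosla/2x2-Cube-Solver | backend/scripts/main.py | states_to_half_turn
-- ===== SOURCE A (Python) =====
-- def states_to_half_turn(states, moves):
-- 	"""
-- 	Takes in states and moves (in half turn metric) and converts the states to half turns.
-- 	"""
-- 	states_in_half_turns = [states.pop(0)]
-- 	states_counter = 0
-- 	for move in moves:
-- 		is_double_move = len(move) == 2 and move[1] == '2'
-- 		if is_double_move:
-- 			states_in_half_turns.append(states[states_counter + 1])
-- 			states_counter += 2
-- 		else:
-- 			states_in_half_turns.append(states[states_counter])
-- 			states_counter += 1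
-- 	return states_in_half_turns
-- ===== SOURCE B (Python) =====
-- def states_to_half_turn(states, moves):
-- 	"""
-- 	Takes in states and moves (in half turn metric) and converts the states to half turns.
-- 	"""
-- 	first = states.pop(0)
-- 	steps = [2 if len(move) == 2 and move[1] == '2' else 1 for move in moves]
-- 	cums = []
-- 	total = 0
-- 	for s in steps:
-- 		total += s
-- 		cums.append(total)
-- 	return [first] + [states[c - 1] for c in cums]
-- ===== Notes on version B (the rewrite author's own statement) =====
-- stated objective: alternative
-- what changed: B separates the work into three passes -- a step table (1 or 2 per move), a prefix-sum pass turning steps into cumulative landing indices, and one final gather over those indices -- instead of A's single loop that interleaves the branch, the append and the counter update; the states.pop(0) mutation is preserved.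
import Mathlib
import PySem

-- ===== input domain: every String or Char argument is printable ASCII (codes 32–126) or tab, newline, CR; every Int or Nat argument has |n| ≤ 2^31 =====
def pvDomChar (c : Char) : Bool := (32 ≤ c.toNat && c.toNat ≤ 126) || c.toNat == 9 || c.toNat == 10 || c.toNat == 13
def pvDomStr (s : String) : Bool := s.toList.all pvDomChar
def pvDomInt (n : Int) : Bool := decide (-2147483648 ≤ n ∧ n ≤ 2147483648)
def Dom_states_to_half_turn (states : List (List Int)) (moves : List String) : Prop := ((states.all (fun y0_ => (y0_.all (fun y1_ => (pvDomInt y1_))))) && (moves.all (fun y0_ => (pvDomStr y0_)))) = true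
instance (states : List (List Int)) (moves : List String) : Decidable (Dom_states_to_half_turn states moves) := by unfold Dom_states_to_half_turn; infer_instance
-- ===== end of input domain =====

-- B restructures A's single interleaved loop into three passes (step table, prefix sums, gather);
-- both mutate `states` by popping its head — the theorems here are about the RETURN value only.

-- ===== PORT A =====
-- A: pop the first state, then one loop that branches on the double-move test,
-- appends states[counter(+1)] and advances the counter by 1 or 2.
def states_to_half_turn (states : List (List Int)) (moves : List String) : List (List Int) :=
  let tail := states.drop 1                       -- states after states.pop(0)
  let init : List (List Int) × Int := ([(PySem.List.pyGet? states 0).getD []], 0)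
  (moves.foldl (fun p move =>
      let is_double_move := PySem.Str.len move == 2 && PySem.Str.pyGet? move 1 == some '2'
      if is_double_move then
        (p.1 ++ [(PySem.List.pyGet? tail (p.2 + 1)).getD []], p.2 + 2)
      else
        (p.1 ++ [(PySem.List.pyGet? tail p.2).getD []], p.2 + 1)) init).1

-- ===== PORT B =====
-- B: step table, prefix-sum loop, then a single gather comprehension.
def states_to_half_turn_alt (states : List (List Int)) (moves : List String) : List (List Int) :=
  let first := (PySem.List.pyGet? states 0).getD []
  let tail := states.drop 1                       -- states after states.pop(0)
  let steps := moves.map (fun move =>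
      if PySem.Str.len move == 2 && PySem.Str.pyGet? move 1 == some '2' then (2 : Int) else 1)
  let cums := (steps.foldl (fun (q : List Int × Int) s => (q.1 ++ [q.2 + s], q.2 + s)) ([], 0)).1
  first :: cums.map (fun c => (PySem.List.pyGet? tail (c - 1)).getD [])

-- ===== PRECONDITION & SPEC =====
-- the size of a move's step, used only to state the index bound of Pre_
def pvStep_states_to_half_turn (move : String) : Int :=
  if PySem.Str.len move == 2 && PySem.Str.pyGet? move 1 == some '2' then 2 else 1

-- Pre_ excludes exactly the inputs where Python A raises IndexError: an empty `states`
-- (pop from empty list) or moves whose cumulative steps overrun the remaining states.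
def Pre_states_to_half_turn (states : List (List Int)) (moves : List String) : Prop :=
  states ≠ [] ∧ (moves.map pvStep_states_to_half_turn).sum ≤ (states.length : Int) - 1
instance (states : List (List Int)) (moves : List String) : Decidable (Pre_states_to_half_turn states moves) := by
  unfold Pre_states_to_half_turn; infer_instance

def pvWitness_states_to_half_turn : List (List Int) × List String := ([[1], [2], [3], [4]], ["R", "U2"])

def Spec_states_to_half_turn (states : List (List Int)) (moves : List String) (out : List (List Int)) : Prop := out = states_to_half_turn_alt states moves
instance (states : List (List Int)) (moves : List String) (out : List (List Int)) : Decidable (Spec_states_to_half_turn states moves out) := by unfold Spec_states_to_half_turn; infer_instance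

-- ===== CLAIM (what is proved, stated in full; the proofs are below) =====
def Claim_equal_states_to_half_turn : Prop := ∀ (states : List (List Int)) (moves : List String), Dom_states_to_half_turn states moves → Pre_states_to_half_turn states moves → Spec_states_to_half_turn states moves (states_to_half_turn states moves)

-- ===== LEMMAS AND PROOFS =====

-- the list of cumulative landing indices starting from counter t
def pvCum (moves : List String) (t : Int) : List Int :=
  match moves with
  | [] => []
  | m :: ms => (t + pvStep_states_to_half_turn m) :: pvCum ms (t + pvStep_states_to_half_turn m)

-- A's loop produces exactly the gather of pvCum
lemma pvLoopA (tail : List (List Int)) :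
    ∀ (ms : List String) (acc : List (List Int)) (t : Int),
    (ms.foldl (fun p move =>
      let is_double_move := PySem.Str.len move == 2 && PySem.Str.pyGet? move 1 == some '2'
      if is_double_move then
        (p.1 ++ [(PySem.List.pyGet? tail (p.2 + 1)).getD []], p.2 + 2)
      else
        (p.1 ++ [(PySem.List.pyGet? tail p.2).getD []], p.2 + 1)) (acc, t)).1
    = acc ++ (pvCum ms t).map (fun c => (PySem.List.pyGet? tail (c - 1)).getD []) := by
  intro ms
  induction ms with
  | nil => intro acc t; simp [pvCum]
  | cons m ms ih =>
    intro acc t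
    simp only [List.foldl_cons, pvCum, List.map_cons]
    by_cases h : (PySem.Str.len m == 2 && PySem.Str.pyGet? m 1 == some '2') = true
    · simp only [h, if_pos, pvStep_states_to_half_turn, ih]
      have h21 : t + 2 - 1 = t + 1 := by ring
      rw [h21]
      simp
    · simp only [pvStep_states_to_half_turn, h, ih]
      simp

-- B's prefix-sum loop produces pvCum
lemma pvLoopB : ∀ (ms : List String) (cs : List Int) (t : Int),
    ((ms.map (fun move =>
        if PySem.Str.len move == 2 && PySem.Str.pyGet? move 1 == some '2' then (2 : Int) else 1)).foldl
      (fun (q : List Int × Int) s => (q.1 ++ [q.2 + s], q.2 + s)) (cs, t)).1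
    = cs ++ pvCum ms t := by
  intro ms
  induction ms with
  | nil => intro cs t; simp [pvCum]
  | cons m ms ih =>
    intro cs t
    simp only [List.map_cons, List.foldl_cons, pvCum, pvStep_states_to_half_turn, ih]
    simp

-- ===== VERDICT (by name: the statement is the Claim_ definition above) =====
theorem states_to_half_turn_spec : Claim_equal_states_to_half_turn := by
  intro states moves _ _
  unfold Spec_states_to_half_turn states_to_half_turn states_to_half_turn_alt
  simp only []
  rw [pvLoopA, pvLoopB]
  simp
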